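-- pv_equiv track=rewrite | github.com/itai-hania/HFI | src/processor/prompt_builder.py | build_relevant_glossary_section
-- ===== SOURCE A (Python) =====
-- from typing import Optional, Dict, Tuple, List
--
-- def build_glossary_section(glossary: Dict[str, str]) -> str:
--     """Build glossary string for prompts (all terms)."""
--     if not glossary:
--         return ""
--     return "\n".join(f"- {eng}: {heb}" for eng, heb in glossary.items())
--
-- _COMMON_FINANCE_TERMS = {
--     'Bitcoin', 'Ethereum', 'blockchain', 'crypto', 'fintech',
--     'IPO', 'ETF', 'stock', 'market', 'investor',
-- }
--
-- def build_relevant_glossary_section(glossary: Dict[str, str],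
--                                      source_text: str,
--                                      max_terms: int = 20) -> str:
--     """Build glossary section with only terms relevant to the source text.
--
--     Scores each glossary term by presence in source_text:
--       - Exact case-insensitive match of English key: +10
--       - Partial word boundary match: +5
--     Returns top max_terms terms. Falls back to common finance defaults
--     if fewer than 5 matches found.
--     """
--     if not glossary:
--         return ""
--     if not source_text:
--         return build_glossary_section(glossary)
--
--     source_lower = source_text.lower()
--
--     scored: List[Tuple[str, str, int]] = []
--     for eng, heb in glossary.items():
--         eng_lower = eng.lower()
--         score = 0
--         if eng_lower in source_lower:
--             score += 10
--         elif any(word.startswith(eng_lower) or eng_lower.startswith(word)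
--                  for word in source_lower.split()
--                  if len(word) > 2):
--             score += 5
--         scored.append((eng, heb, score))
--
--     # Sort by score desc, keep only those with score > 0
--     matched = [(e, h, s) for e, h, s in scored if s > 0]
--     matched.sort(key=lambda x: -x[2])
--
--     if len(matched) < 5:
--         # Fill with common finance defaults
--         for eng, heb, _ in scored:
--             if eng in _COMMON_FINANCE_TERMS and (eng, heb, 0) not in [(e, h, 0) for e, h, _ in matched]:
--                 matched.append((eng, heb, 0))
--             if len(matched) >= max_terms:
--                 break
--
--     selected = matched[:max_terms]
--     if not selected:
--         return build_glossary_section(glossary)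
--
--     return "\n".join(f"- {eng}: {heb}" for eng, heb, _ in selected)
-- ===== SOURCE B (Python) =====
-- _COMMON_FINANCE_TERMS = {
--     'Bitcoin', 'Ethereum', 'blockchain', 'crypto', 'fintech',
--     'IPO', 'ETF', 'stock', 'market', 'investor',
-- }
--
--
-- def build_relevant_glossary_section(glossary, source_text, max_terms=20):
--     """Different decomposition: the source's >2-char words are split, filtered and
--     deduplicated once up front (A re-splits and re-filters them for every term);
--     terms are bucketed into score-10/score-5 lists so A's stable sort disappears
--     (only two score values occur); the fallback dedups with a set."""
--     if not glossary:
--         return ""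
--     items = list(glossary.items())
--     if not source_text:
--         return "\n".join(f"- {eng}: {heb}" for eng, heb in items)
--
--     source_lower = source_text.lower()
--     words = {w for w in source_lower.split() if len(w) > 2}
--
--     tens, fives = [], []
--     for eng, heb in items:
--         el = eng.lower()
--         if el in source_lower:
--             tens.append((eng, heb))
--         elif any(w.startswith(el) or el.startswith(w) for w in words):
--             fives.append((eng, heb))
--
--     matched = tens + fives
--     if len(matched) < 5:
--         seen = set(matched)
--         for pair in items:
--             if len(matched) >= max_terms:
--                 break
--             if pair[0] in _COMMON_FINANCE_TERMS and pair not in seen: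
--                 matched.append(pair)
--                 seen.add(pair)
--
--     selected = matched[:max_terms]
--     if not selected:
--         return "\n".join(f"- {eng}: {heb}" for eng, heb in items)
--     return "\n".join(f"- {eng}: {heb}" for eng, heb in selected)
-- ===== Notes on version B (the rewrite author's own statement) =====
-- stated objective: alternative
-- what changed: B splits, filters and deduplicates the source's >2-char words into a set once (A re-splits and re-filters the source for every glossary term), buckets terms directly into score-10/score-5 lists so A's stable sort disappears (only two score values exist), and dedups the fallback loop with a set instead of A's rebuilt comparison list.
import Mathlib
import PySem

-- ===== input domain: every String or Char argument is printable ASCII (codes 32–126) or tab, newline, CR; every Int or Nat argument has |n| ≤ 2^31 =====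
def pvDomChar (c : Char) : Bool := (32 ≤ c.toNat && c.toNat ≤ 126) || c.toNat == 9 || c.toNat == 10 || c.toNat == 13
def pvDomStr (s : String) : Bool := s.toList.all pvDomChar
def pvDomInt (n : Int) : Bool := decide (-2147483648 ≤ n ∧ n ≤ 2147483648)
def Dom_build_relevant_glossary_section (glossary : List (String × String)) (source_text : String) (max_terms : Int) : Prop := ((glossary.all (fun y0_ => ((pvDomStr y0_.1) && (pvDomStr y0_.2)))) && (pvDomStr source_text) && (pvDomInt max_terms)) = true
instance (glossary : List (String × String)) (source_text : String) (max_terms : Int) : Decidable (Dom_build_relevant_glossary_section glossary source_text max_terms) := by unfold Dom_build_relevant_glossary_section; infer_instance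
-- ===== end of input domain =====

-- B splits, filters and dedups the source words once up front (A redoes it per term),
-- buckets terms into score-10/score-5 lists instead of A's stable sort (only two score
-- values occur), and dedups the fallback loop with a set (objective: alternative).

-- _COMMON_FINANCE_TERMS (a Python set literal, used only for membership tests)
def pvCommonTerms : List String :=
  ["Bitcoin", "Ethereum", "blockchain", "crypto", "fintech",
   "IPO", "ETF", "stock", "market", "investor"]

-- f"- {eng}: {heb}" for a pair
def pvFmt (p : String × String) : String := "- " ++ p.1 ++ ": " ++ p.2

-- ===== PORT A =====

-- build_glossary_section (module helper A calls)
def pvBuildGlossaryA (glossary : List (String × String)) : String :=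
  if glossary = [] then "" else PySem.Str.join "\n" (glossary.map pvFmt)

-- the 'any(word.startswith(eng_lower) or eng_lower.startswith(word) for word in source_lower.split() if len(word) > 2)' test
def pvWordHit (source_lower el : String) : Bool :=
  ((PySem.Str.split₀ source_lower).filter (fun w => 2 < PySem.Str.len w)).any
    (fun w => PySem.Str.startswith w el || PySem.Str.startswith el w)

-- the score computed in A's first loop
def pvScoreA (source_lower eng : String) : Int :=
  let el := PySem.Str.lower eng
  if PySem.Str.isIn el source_lower then 10
  else if pvWordHit source_lower el then 5 else 0

-- A's fallback loop over `scored` (append eligible common terms, then break once len >= max_terms)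
def pvFillA (mt : Int) : List (String × String × Int) → List (String × String × Int) → List (String × String × Int)
  | [], m => m
  | t :: rest, m =>
    let m' := if t.1 ∈ pvCommonTerms ∧
                 (t.1, t.2.1, (0 : Int)) ∉ m.map (fun u => (u.1, u.2.1, (0 : Int)))
              then m ++ [(t.1, t.2.1, (0 : Int))] else m
    if mt ≤ (m'.length : Int) then m' else pvFillA mt rest m'

def build_relevant_glossary_section (glossary : List (String × String)) (source_text : String) (max_terms : Int) : String :=
  if glossary = [] then ""
  else if source_text = "" then pvBuildGlossaryA glossary
  else
    let source_lower := PySem.Str.lower source_text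
    let scored : List (String × String × Int) :=
      glossary.foldl (fun acc p => acc ++ [(p.1, p.2, pvScoreA source_lower p.1)]) []
    let matched := scored.filter (fun t => 0 < t.2.2)
    let matched := PySem.List.sorted matched (fun t => -t.2.2)
    let matched := if matched.length < 5 then pvFillA max_terms scored matched else matched
    let selected := PySem.List.slice matched none (some max_terms)
    if selected = [] then pvBuildGlossaryA glossary
    else PySem.Str.join "\n" (selected.map (fun t => "- " ++ t.1 ++ ": " ++ t.2.1))

-- ===== PORT B =====

-- B's one-time pass over the source: the deduplicated set of words with len > 2
def pvWords (source_lower : String) : PySem.Set String :=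
  PySem.Set.ofList ((PySem.Str.split₀ source_lower).filter (fun w => 2 < PySem.Str.len w))

-- B's per-term test against the precomputed word set
def pvHitB (wordsSet : PySem.Set String) (el : String) : Bool :=
  wordsSet.any (fun w => PySem.Str.startswith w el || PySem.Str.startswith el w)

-- B's fallback loop over the glossary items, with a set-based dedup
def pvFillB (mt : Int) : List (String × String) → List (String × String) → PySem.Set (String × String) → List (String × String)
  | [], m, _ => m
  | p :: rest, m, seen =>
    if mt ≤ (m.length : Int) then m
    else if p.1 ∈ pvCommonTerms ∧ p ∉ seen then pvFillB mt rest (m ++ [p]) (PySem.Set.add seen p)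
    else pvFillB mt rest m seen

def build_relevant_glossary_section_alt (glossary : List (String × String)) (source_text : String) (max_terms : Int) : String :=
  if glossary = [] then ""
  else if source_text = "" then PySem.Str.join "\n" (glossary.map pvFmt)
  else
    let source_lower := PySem.Str.lower source_text
    let ws := pvWords source_lower
    let tf := glossary.foldl
      (fun (acc : List (String × String) × List (String × String)) p =>
        let el := PySem.Str.lower p.1
        if PySem.Str.isIn el source_lower then (acc.1 ++ [p], acc.2)
        else if pvHitB ws el then (acc.1, acc.2 ++ [p])
        else acc)
      ([], [])
    let matched := tf.1 ++ tf.2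
    let matched := if matched.length < 5
                   then pvFillB max_terms glossary matched (PySem.Set.ofList matched)
                   else matched
    let selected := PySem.List.slice matched none (some max_terms)
    if selected = [] then PySem.Str.join "\n" (glossary.map pvFmt)
    else PySem.Str.join "\n" (selected.map pvFmt)

-- ===== PRECONDITION & SPEC =====
-- Pre_ restricts max_terms to the natural domain of a count (max_terms ≥ 0): on a negative
-- max_terms A still returns, but its value there is an accident of Python's negative slice
-- 'matched[:max_terms]' dropping trailing matches after the fallback loop's immediate break;
-- B applies the same slice to its own matched list and does the natural thing there.
def Pre_build_relevant_glossary_section (glossary : List (String × String)) (source_text : String) (max_terms : Int) : Prop :=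
  0 ≤ max_terms
instance (glossary : List (String × String)) (source_text : String) (max_terms : Int) : Decidable (Pre_build_relevant_glossary_section glossary source_text max_terms) := by unfold Pre_build_relevant_glossary_section; infer_instance

def pvWitness_build_relevant_glossary_section : (List (String × String)) × String × Int :=
  ([("Bitcoin", "BTC"), ("stock", "shares")], "the stock market", 3)

def Spec_build_relevant_glossary_section (glossary : List (String × String)) (source_text : String) (max_terms : Int) (out : String) : Prop := out = build_relevant_glossary_section_alt glossary source_text max_terms
instance (glossary : List (String × String)) (source_text : String) (max_terms : Int) (out : String) : Decidable (Spec_build_relevant_glossary_section glossary source_text max_terms out) := by unfold Spec_build_relevant_glossary_section; infer_instance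

-- ===== CLAIM (what is proved, stated in full; the proofs are below) =====
def Claim_equal_build_relevant_glossary_section : Prop := ∀ (glossary : List (String × String)) (source_text : String) (max_terms : Int), Dom_build_relevant_glossary_section glossary source_text max_terms → Pre_build_relevant_glossary_section glossary source_text max_terms → Spec_build_relevant_glossary_section glossary source_text max_terms (build_relevant_glossary_section glossary source_text max_terms)

-- ===== LEMMAS AND PROOFS =====

-- projection from A's scored triples to B's pairs
def pvPr (t : String × String × Int) : String × String := (t.1, t.2.1)

theorem pvHit_eq (sl el : String) : pvHitB (pvWords sl) el = pvWordHit sl el := by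
  unfold pvHitB pvWords pvWordHit
  rw [Bool.eq_iff_iff, List.any_eq_true, List.any_eq_true]
  constructor <;> rintro ⟨w, hw, hs⟩ <;>
    exact ⟨w, by simpa [PySem.Set.mem_ofList] using hw, hs⟩

theorem pvInsertBy_skip {α : Type} (bef : α → α → Bool)
    (x : α) (pre post : List α)
    (h : ∀ a ∈ pre, bef x a = false) :
    PySem.List.insertBy bef x (pre ++ post) = pre ++ PySem.List.insertBy bef x post := by
  induction pre with
  | nil => simp
  | cons a pre ih =>
    simp only [List.cons_append, PySem.List.insertBy]
    rw [h a List.mem_cons_self]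
    simp only [Bool.false_eq_true, if_false]
    rw [ih (fun a ha => h a (List.mem_cons_of_mem _ ha))]

theorem pvSortAux (l X Y : List (String × String × Int))
    (hl : ∀ t ∈ l, t.2.2 = 5 ∨ t.2.2 = 10)
    (hX : ∀ t ∈ X, t.2.2 = 10) (hY : ∀ t ∈ Y, t.2.2 = 5) :
    l.foldl (fun acc x =>
        PySem.List.insertBy (fun a b => decide ((fun t : String × String × Int => -t.2.2) a < (fun t : String × String × Int => -t.2.2) b)) x acc) (X ++ Y)
      = (X ++ l.filter (fun t => t.2.2 == 10)) ++ (Y ++ l.filter (fun t => t.2.2 == 5)) := by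
  induction l generalizing X Y with
  | nil => simp
  | cons t rest ih =>
    simp only [List.foldl_cons, List.filter_cons]
    rcases hl t List.mem_cons_self with h5 | h10
    · have hins : PySem.List.insertBy
          (fun a b => decide ((fun t : String × String × Int => -t.2.2) a < (fun t : String × String × Int => -t.2.2) b)) t (X ++ Y)
          = (X ++ Y) ++ [t] := by
        apply PySem.List.insertBy_of_forall_not_before
        intro y hy
        rcases List.mem_append.mp hy with hy | hy
        · simp [hX y hy, h5]
        · simp [hY y hy, h5]
      rw [hins, List.append_assoc]
      rw [ih X (Y ++ [t]) (fun u hu => hl u (List.mem_cons_of_mem _ hu)) hX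
        (by intro u hu; rcases List.mem_append.mp hu with hu | hu
            · exact hY u hu
            · simp_all)]
      simp [h5, List.append_assoc]
    · have hins : PySem.List.insertBy
          (fun a b => decide ((fun t : String × String × Int => -t.2.2) a < (fun t : String × String × Int => -t.2.2) b)) t (X ++ Y)
          = (X ++ [t]) ++ Y := by
        rw [pvInsertBy_skip _ _ X Y (fun a ha => by simp [hX a ha, h10])]
        cases Y with
        | nil => simp [PySem.List.insertBy]
        | cons y ys =>
          simp only [PySem.List.insertBy]
          rw [if_pos (by simp [hY y List.mem_cons_self, h10])]
          simp
      rw [hins]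
      rw [ih (X ++ [t]) Y (fun u hu => hl u (List.mem_cons_of_mem _ hu))
        (by intro u hu; rcases List.mem_append.mp hu with hu | hu
            · exact hX u hu
            · simp_all) hY]
      simp [h10, List.append_assoc]

theorem pvSorted_two (l : List (String × String × Int))
    (h : ∀ t ∈ l, t.2.2 = 5 ∨ t.2.2 = 10) :
    PySem.List.sorted l (fun t => -t.2.2)
      = l.filter (fun t => t.2.2 == 10) ++ l.filter (fun t => t.2.2 == 5) := by
  rw [PySem.List.sorted_eq_foldl_insertBy]
  simpa using pvSortAux l [] [] h (by simp) (by simp)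

-- fill lemmas --------------------------------------------------------------

theorem pvFillB_mono (mt : Int) (g : List (String × String)) (m : List (String × String))
    (seen : PySem.Set (String × String)) : ∃ s, pvFillB mt g m seen = m ++ s := by
  induction g generalizing m seen with
  | nil => exact ⟨[], by simp [pvFillB]⟩
  | cons p rest ih =>
    simp only [pvFillB]
    split
    · exact ⟨[], by simp⟩
    · split
      · rcases ih (m ++ [p]) (PySem.Set.add seen p) with ⟨s, hs⟩
        exact ⟨[p] ++ s, by rw [hs, List.append_assoc]⟩
      · exact ih m seen

theorem pvMemZero (p : String × String) (mA : List (String × String × Int)) :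
    (p.1, p.2, (0 : Int)) ∈ mA.map (fun u => (u.1, u.2.1, (0 : Int))) ↔ p ∈ mA.map pvPr := by
  simp [List.mem_map, pvPr, Prod.ext_iff]

theorem pvFill_take (mt : Int) (hmt : 0 ≤ mt) (f : String × String → String × String × Int)
    (hf1 : ∀ p, (f p).1 = p.1) (hf2 : ∀ p, (f p).2.1 = p.2)
    (g : List (String × String))
    (mA : List (String × String × Int)) (seen : PySem.Set (String × String))
    (hseen : ∀ p, p ∈ seen ↔ p ∈ mA.map pvPr) :
    List.take mt.toNat ((pvFillA mt (g.map f) mA).map pvPr)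
      = List.take mt.toNat (pvFillB mt g (mA.map pvPr) seen) := by
  induction g generalizing mA seen with
  | nil => simp [pvFillA, pvFillB]
  | cons p rest ih =>
    obtain ⟨p1, p2⟩ := p
    simp only [List.map_cons, pvFillA, pvFillB, hf1, hf2]
    set m' := (if p1 ∈ pvCommonTerms ∧
        (p1, p2, (0 : Int)) ∉ mA.map (fun u => (u.1, u.2.1, (0 : Int)))
        then mA ++ [(p1, p2, (0 : Int))] else mA) with hm'
    have hcond : (p1 ∈ pvCommonTerms ∧
        (p1, p2, (0 : Int)) ∉ mA.map (fun u => (u.1, u.2.1, (0 : Int))))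
        ↔ (p1 ∈ pvCommonTerms ∧ (p1, p2) ∉ seen) := by
      rw [pvMemZero (p1, p2) mA, hseen]
    have hlen' : mA.length ≤ m'.length := by
      rw [hm']; split <;> simp
    by_cases hstop : mt ≤ (((mA.map pvPr).length : Nat) : Int)
    · rw [if_pos hstop]
      have hn : mt.toNat ≤ (mA.map pvPr).length := by
        simp only [List.length_map] at *; omega
      rw [if_pos (by simp only [List.length_map] at hstop; omega)]
      rw [hm']; split
      · rw [List.map_append, List.take_append_of_le_length hn]
      · rfl
    · rw [if_neg hstop]
      simp only [List.length_map] at hstop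
      by_cases helig : p1 ∈ pvCommonTerms ∧ (p1, p2) ∉ seen
      · have hm'' : m' = mA ++ [(p1, p2, (0 : Int))] := by
          rw [hm', if_pos (hcond.mpr helig)]
        have hmapped : m'.map pvPr = mA.map pvPr ++ [(p1, p2)] := by
          rw [hm'']; simp [pvPr]
        rw [if_pos helig]
        by_cases hfull : mt ≤ ((m'.length : Nat) : Int)
        · rw [if_pos hfull]
          have hnn : mt.toNat = (mA.map pvPr ++ [(p1, p2)]).length := by
            rw [hm''] at hfull
            simp only [List.length_append, List.length_map, List.length_cons,
              List.length_nil] at *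
            omega
          rcases pvFillB_mono mt rest (mA.map pvPr ++ [(p1, p2)]) (PySem.Set.add seen (p1, p2))
            with ⟨s, hs⟩
          rw [hmapped, hs, hnn, List.take_length, List.take_append_of_le_length le_rfl,
            List.take_length]
        · rw [if_neg hfull]
          have hseen' : ∀ q, q ∈ PySem.Set.add seen (p1, p2) ↔ q ∈ m'.map pvPr := by
            intro q
            rw [PySem.Set.mem_add, hseen, hmapped]
            simp
          have := ih m' (PySem.Set.add seen (p1, p2)) hseen'
          rw [hmapped] at this
          exact this
      · have hm'' : m' = mA := by
          rw [hm', if_neg (fun h => helig (hcond.mp h))]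
        rw [if_neg (by rw [hm'']; intro h; exact hstop (by simpa using h)), if_neg helig, hm'']
        exact ih mA seen hseen

-- pvScoreA's branches characterised as Bool equations
theorem pvScore_ten (sl e : String) :
    (pvScoreA sl e == 10) = PySem.Str.isIn (PySem.Str.lower e) sl := by
  unfold pvScoreA
  dsimp only
  split
  · simp_all
  · split <;> simp_all

theorem pvScore_five (sl e : String) :
    (pvScoreA sl e == 5)
      = (!PySem.Str.isIn (PySem.Str.lower e) sl && pvWordHit sl (PySem.Str.lower e)) := by
  unfold pvScoreA
  dsimp only
  split
  · simp_all
  · split <;> simp_all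

theorem pvScoreA_cases (sl e : String) :
    pvScoreA sl e = 0 ∨ pvScoreA sl e = 5 ∨ pvScoreA sl e = 10 := by
  unfold pvScoreA
  dsimp only
  split
  · tauto
  · split <;> tauto

-- B's two-bucket loop computes a pair of filters
theorem pvTF_eq (sl : String) (g : List (String × String))
    (a b : List (String × String)) :
    g.foldl
      (fun (acc : List (String × String) × List (String × String)) p =>
        if PySem.Str.isIn (PySem.Str.lower p.1) sl then (acc.1 ++ [p], acc.2)
        else if pvHitB (pvWords sl) (PySem.Str.lower p.1) then (acc.1, acc.2 ++ [p])
        else acc)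
      (a, b)
    = (a ++ g.filter (fun p => PySem.Str.isIn (PySem.Str.lower p.1) sl),
       b ++ g.filter (fun p => !PySem.Str.isIn (PySem.Str.lower p.1) sl
                               && pvHitB (pvWords sl) (PySem.Str.lower p.1))) := by
  induction g generalizing a b with
  | nil => simp
  | cons p rest ih =>
    simp only [List.foldl_cons, List.filter_cons]
    by_cases h10 : PySem.Str.isIn (PySem.Str.lower p.1) sl
    · rw [if_pos h10, ih]
      simp_all [List.append_assoc]
    · rw [if_neg h10]
      by_cases h5 : pvHitB (pvWords sl) (PySem.Str.lower p.1)
      · rw [if_pos h5, ih]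
        simp_all [List.append_assoc]
      · rw [if_neg h5, ih]
        simp_all

-- the matched list A sorts, projected to pairs, is B's two buckets
theorem pvMatched_map (sl : String) (g : List (String × String)) :
    (PySem.List.sorted
        ((g.map (fun p => (p.1, p.2, pvScoreA sl p.1))).filter (fun t => 0 < t.2.2))
        (fun t => -t.2.2)).map pvPr
      = g.filter (fun p => PySem.Str.isIn (PySem.Str.lower p.1) sl)
        ++ g.filter (fun p => !PySem.Str.isIn (PySem.Str.lower p.1) sl
                              && pvHitB (pvWords sl) (PySem.Str.lower p.1)) := by
  have hmem : ∀ t ∈ (g.map (fun p => (p.1, p.2, pvScoreA sl p.1))).filter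
      (fun t => 0 < t.2.2), t.2.2 = 5 ∨ t.2.2 = 10 := by
    intro t ht
    have h1 := List.mem_filter.mp ht
    rcases List.mem_map.mp h1.1 with ⟨p, _, rfl⟩
    have h2 : (0 : Int) < pvScoreA sl p.1 := by simpa using h1.2
    rcases pvScoreA_cases sl p.1 with h | h | h <;> simp [h] at h2 ⊢
  rw [pvSorted_two _ hmem, List.map_append, List.filter_filter, List.filter_filter]
  have e10 : (fun t : String × String × Int => (t.2.2 == 10) && decide (0 < t.2.2))
      = fun t => t.2.2 == 10 := by
    funext t; by_cases h : t.2.2 = 10 <;> simp [h]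
  have e5 : (fun t : String × String × Int => (t.2.2 == 5) && decide (0 < t.2.2))
      = fun t => t.2.2 == 5 := by
    funext t; by_cases h : t.2.2 = 5 <;> simp [h]
  rw [e10, e5, List.filter_map, List.filter_map, List.map_map, List.map_map]
  have hid : (pvPr ∘ fun p : String × String => (p.1, p.2, pvScoreA sl p.1)) = id := by
    funext p; rfl
  rw [hid, List.map_id, List.map_id]
  congr 1
  · apply List.filter_congr
    intro p _
    simpa using pvScore_ten sl p.1
  · apply List.filter_congr
    intro p _
    have := pvScore_five sl p.1
    rw [pvHit_eq]
    simpa using this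

-- the shared final step of both programs, for B's selected list = A's projected to pairs
theorem pvFinal (g : List (String × String)) (hg : g ≠ []) (selA : List (String × String × Int)) :
    (if selA = [] then pvBuildGlossaryA g
     else PySem.Str.join "\n" (selA.map (fun t => "- " ++ t.1 ++ ": " ++ t.2.1)))
    = (if selA.map pvPr = [] then PySem.Str.join "\n" (g.map pvFmt)
       else PySem.Str.join "\n" ((selA.map pvPr).map pvFmt)) := by
  by_cases hsel : selA = []
  · rw [if_pos hsel, if_pos (by simp [hsel]), pvBuildGlossaryA, if_neg hg]
  · rw [if_neg hsel, if_neg (by simp [hsel]), List.map_map]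
    rfl

-- ===== VERDICT (by name: the statement is the Claim_ definition above) =====
theorem build_relevant_glossary_section_spec : Claim_equal_build_relevant_glossary_section := by
  intro glossary source_text max_terms _ hpre
  unfold Spec_build_relevant_glossary_section
  unfold Pre_build_relevant_glossary_section at hpre
  unfold build_relevant_glossary_section build_relevant_glossary_section_alt
  by_cases hg : glossary = []
  · simp [hg]
  · rw [if_neg hg, if_neg hg]
    by_cases hsrc : source_text = ""
    · rw [if_pos hsrc, if_pos hsrc]
      unfold pvBuildGlossaryA
      rw [if_neg hg]
    · rw [if_neg hsrc, if_neg hsrc]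
      dsimp only
      have hscored : glossary.foldl
          (fun acc p => acc ++ [(p.1, p.2, pvScoreA (PySem.Str.lower source_text) p.1)])
          ([] : List (String × String × Int))
          = glossary.map (fun p => (p.1, p.2, pvScoreA (PySem.Str.lower source_text) p.1)) := by
        rw [PySem.List.foldl_append_singleton_eq_map]
        simp
      have htf : glossary.foldl
          (fun (acc : List (String × String) × List (String × String)) p =>
            if PySem.Str.isIn (PySem.Str.lower p.1) (PySem.Str.lower source_text) then (acc.1 ++ [p], acc.2)
            else if pvHitB (pvWords (PySem.Str.lower source_text)) (PySem.Str.lower p.1) then (acc.1, acc.2 ++ [p])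
            else acc)
          ([], [])
          = (glossary.filter (fun p => PySem.Str.isIn (PySem.Str.lower p.1) (PySem.Str.lower source_text)),
             glossary.filter (fun p => !PySem.Str.isIn (PySem.Str.lower p.1) (PySem.Str.lower source_text)
                 && pvHitB (pvWords (PySem.Str.lower source_text)) (PySem.Str.lower p.1))) := by
        rw [pvTF_eq (PySem.Str.lower source_text) glossary [] []]
        simp
      rw [hscored, htf]
      dsimp only
      rw [← pvMatched_map (PySem.Str.lower source_text) glossary]
      set MS := PySem.List.sorted
        ((glossary.map (fun p => (p.1, p.2, pvScoreA (PySem.Str.lower source_text) p.1))).filter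
          (fun t => 0 < t.2.2)) (fun t => -t.2.2) with hMS
      simp only [List.length_map]
      by_cases hlt : MS.length < 5
      · rw [if_pos hlt, if_pos hlt,
          PySem.List.slice_to _ hpre, PySem.List.slice_to _ hpre]
        have hfill := pvFill_take max_terms hpre
          (fun p : String × String => (p.1, p.2, pvScoreA (PySem.Str.lower source_text) p.1))
          (fun p => rfl) (fun p => rfl) glossary MS
          (PySem.Set.ofList (MS.map pvPr)) (fun p => PySem.Set.mem_ofList _ _)
        have hselB : List.take max_terms.toNat
            (pvFillB max_terms glossary (MS.map pvPr) (PySem.Set.ofList (MS.map pvPr)))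
            = (List.take max_terms.toNat
                (pvFillA max_terms
                  (glossary.map (fun p => (p.1, p.2, pvScoreA (PySem.Str.lower source_text) p.1)))
                  MS)).map pvPr := by
          rw [List.map_take, hfill]
        rw [hselB]
        exact pvFinal glossary hg _
      · rw [if_neg hlt, if_neg hlt,
          PySem.List.slice_to _ hpre, PySem.List.slice_to _ hpre, ← List.map_take]
        exact pvFinal glossary hg _
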